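-- pv_equiv track=rewrite | github.com/2403a52233-sudo/AIAC | lab 3/lab test/task1.py | factorial_febo
-- ===== SOURCE A (Python) =====
-- def factorial_febo(n):
-- 	"""Return factorial of n and Fibonacci series of n terms.
-- 	Args:
-- 		n (int): Non-negative integer specifying which factorial to compute and how many Fibonacci terms to generate.
-- 	Returns:
-- 		tuple[int, list[int]]: A tuple where the first element is n! and the second is a list of the first n Fibonacci numbers.
-- 	Raises:
-- 		TypeError: If n is not an int.
-- 		ValueError: If n is negative.
-- 	"""
-- 	if not isinstance(n, int):
-- 		raise TypeError("n must be an integer")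
-- 	if n < 0:
-- 		raise ValueError("n must be a non-negative integer")
-- 	factorial_result = 1
-- 	for current_value in range(2, n + 1):
-- 		factorial_result *= current_value
--
-- 	fibonacci_series = []
-- 	if n >= 1:
-- 		fibonacci_series.append(0)
-- 	if n >= 2:
-- 		fibonacci_series.append(1)
-- 	while len(fibonacci_series) < n:
-- 		next_value = fibonacci_series[-1] + fibonacci_series[-2]
-- 		fibonacci_series.append(next_value)
-- 	return factorial_result, fibonacci_series
-- ===== SOURCE B (Python) =====
-- def factorial_febo(n):
--     """Return factorial of n and Fibonacci series of n terms."""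
--     if not isinstance(n, int):
--         raise TypeError("n must be an integer")
--     if n < 0:
--         raise ValueError("n must be a non-negative integer")
--
--     def prod_range(lo, hi):
--         # product of the integers lo..hi inclusive, by balanced splitting
--         if lo > hi:
--             return 1
--         if lo == hi:
--             return lo
--         mid = (lo + hi) // 2
--         return prod_range(lo, mid) * prod_range(mid + 1, hi)
--
--     def fib_pair(k):
--         # (F(k), F(k+1)) by fast doubling
--         if k == 0:
--             return (0, 1)
--         a, b = fib_pair(k >> 1)
--         c = a * (2 * b - a)
--         d = a * a + b * b
--         if k & 1:
--             return (d, c + d)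
--         return (c, d)
--
--     # build the series back-to-front from the top pair by subtraction
--     x, y = fib_pair(n)  # x = F(n), y = F(n+1)
--     series = []
--     for _ in range(n):
--         x, y = y - x, x
--         series.append(x)
--     series.reverse()
--     return prod_range(2, n), series
-- ===== Notes on version B (the rewrite author's own statement) =====
-- stated objective: alternative
-- what changed: Factorial is computed by a balanced divide-and-conquer product of the range 2..n instead of a left-to-right accumulation, and the Fibonacci series is obtained by computing the top pair with fast doubling and then reconstructing the list back-to-front by repeated subtraction followed by a reverse, instead of growing the list forward from the seeds.
import Mathlib
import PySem

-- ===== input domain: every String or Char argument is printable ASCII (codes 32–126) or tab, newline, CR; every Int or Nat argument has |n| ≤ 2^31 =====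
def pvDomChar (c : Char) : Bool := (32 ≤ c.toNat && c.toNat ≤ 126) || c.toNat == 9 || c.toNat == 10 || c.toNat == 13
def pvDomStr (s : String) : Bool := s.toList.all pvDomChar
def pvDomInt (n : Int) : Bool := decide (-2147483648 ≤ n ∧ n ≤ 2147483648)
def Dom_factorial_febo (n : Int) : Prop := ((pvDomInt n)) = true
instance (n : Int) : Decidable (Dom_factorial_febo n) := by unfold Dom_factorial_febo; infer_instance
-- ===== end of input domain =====

-- B computes the factorial by a balanced divide-and-conquer product of 2..n and the Fibonacci
-- series by fast doubling for the top pair followed by a backward subtraction pass (alternative).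

-- ===== PORT A =====
-- A's while loop: append fib[-1] + fib[-2] while len(fib) < n.
-- fib[-1] / fib[-2] via PySem.List.pyGet?; the loop is only entered with length ≥ 2,
-- so the .getD 0 default is never used on admitted inputs (exact there).
def fibLoopA (n : Int) (fib : List Int) : List Int :=
  if _h : fib.length < n then
    fibLoopA n (fib ++ [(PySem.List.pyGet? fib (-1)).getD 0 + (PySem.List.pyGet? fib (-2)).getD 0])
  else fib
termination_by (n - fib.length).toNat
decreasing_by simp at _h ⊢; omega

def factorial_febo (n : Int) : Int × List Int :=
  -- if n < 0: raise ValueError  → excluded by Pre_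
  let factorial_result := (PySem.List.pyRange 2 (n + 1) 1).foldl (fun acc v => acc * v) 1
  let fib0 : List Int := []
  let fib1 := if n ≥ 1 then fib0 ++ [0] else fib0
  let fib2 := if n ≥ 2 then fib1 ++ [1] else fib1
  (factorial_result, fibLoopA n fib2)

-- ===== PORT B =====
-- product of the integers lo..hi inclusive, by balanced splitting
def prodRange (lo hi : Int) : Int :=
  if lo > hi then 1
  else if _he : lo = hi then lo
  else
    let mid := PySem.Int.floordiv (lo + hi) 2
    prodRange lo mid * prodRange (mid + 1) hi
termination_by (hi - lo).toNat
decreasing_by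
  all_goals
    simp only [PySem.Int.floordiv_eq_ediv_of_pos (by norm_num : (0:Int) < 2)] at *
    omega

-- (F(k), F(k+1)) by fast doubling; Python's k >> 1 / k & 1 are k / 2 / k % 2 on the
-- non-negative k this is called with.
def fibPair (k : Nat) : Int × Int :=
  if h : k = 0 then (0, 1)
  else
    let p := fibPair (k / 2)
    let a := p.1
    let b := p.2
    let c := a * (2 * b - a)
    let d := a * a + b * b
    if k % 2 = 1 then (d, c + d) else (c, d)
termination_by k
decreasing_by exact Nat.div_lt_self (Nat.pos_of_ne_zero h) (by omega)

-- for _ in range(n): x, y = y - x, x; series.append(x)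
def fibDown : Nat → Int → Int → List Int → List Int
  | 0, _, _, out => out
  | k + 1, x, y, out => fibDown k (y - x) x (out ++ [y - x])

def factorial_febo_alt (n : Int) : Int × List Int :=
  let p := fibPair n.toNat
  let series := (fibDown n.toNat p.1 p.2 []).reverse
  (prodRange 2 n, series)

-- ===== PRECONDITION & SPEC =====
-- A raises ValueError on negative n; Pre_ excludes exactly those inputs (B raises there too).
def Pre_factorial_febo (n : Int) : Prop := 0 ≤ n
instance (n : Int) : Decidable (Pre_factorial_febo n) := by unfold Pre_factorial_febo; infer_instance
def pvWitness_factorial_febo : Int := (5)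

def Spec_factorial_febo (n : Int) (out : Int × List Int) : Prop := out = factorial_febo_alt n
instance (n : Int) (out : Int × List Int) : Decidable (Spec_factorial_febo n out) := by unfold Spec_factorial_febo; infer_instance

-- ===== CLAIM (what is proved, stated in full; the proofs are below) =====
def Claim_equal_factorial_febo : Prop := ∀ (n : Int), Dom_factorial_febo n → Pre_factorial_febo n → Spec_factorial_febo n (factorial_febo n)

-- ===== LEMMAS AND PROOFS =====

-- the canonical first-m Fibonacci list, used to relate both sides
def fibList (m : Nat) : List Int := (List.range m).map (fun i => (Nat.fib i : Int))

theorem fibList_succ (m : Nat) : fibList (m + 1) = fibList m ++ [(Nat.fib m : Int)] := by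
  simp [fibList, List.range_succ]

-- the balanced product equals the product of the range
theorem prodRange_eq_prod : ∀ (K : Nat) (lo hi : Int), (hi - lo).toNat ≤ K →
    prodRange lo hi = (PySem.List.pyRange lo (hi + 1) 1).prod := by
  intro K
  induction K with
  | zero =>
    intro lo hi h
    rw [prodRange]
    rcases lt_trichotomy lo hi with hlt | heq | hgt
    · omega
    · subst heq
      simp [PySem.List.pyRange_one_singleton]
    · rw [if_pos hgt, PySem.List.pyRange_one_eq_nil (by omega)]
      simp
  | succ K ih =>
    intro lo hi h
    rw [prodRange]
    rcases lt_trichotomy lo hi with hlt | heq | hgt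
    · rw [if_neg (by omega), dif_neg (by omega)]
      have hmid : PySem.Int.floordiv (lo + hi) 2 = (lo + hi) / 2 :=
        PySem.Int.floordiv_eq_ediv_of_pos (by norm_num)
      set mid := PySem.Int.floordiv (lo + hi) 2 with hm
      have hb : lo ≤ mid ∧ mid < hi := by rw [hmid]; omega
      show prodRange lo mid * prodRange (mid + 1) hi = _
      rw [ih lo mid (by omega), ih (mid + 1) hi (by omega),
          PySem.List.pyRange_one_append lo (mid + 1) (hi + 1) (by omega) (by omega)]
      rw [List.prod_append]
    · subst heq
      simp [PySem.List.pyRange_one_singleton]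
    · rw [if_pos hgt, PySem.List.pyRange_one_eq_nil (by omega)]
      simp

-- fast doubling computes (F(k), F(k+1))
theorem fibPair_eq : ∀ k : Nat, fibPair k = ((Nat.fib k : Int), (Nat.fib (k + 1) : Int)) := by
  intro k
  induction k using Nat.strong_induction_on with
  | _ k ih =>
    rw [fibPair]
    by_cases h : k = 0
    · subst h; simp
    · rw [dif_neg h, ih (k / 2) (Nat.div_lt_self (Nat.pos_of_ne_zero h) (by omega))]
      set m := k / 2 with hm
      have hle : Nat.fib m ≤ 2 * Nat.fib (m + 1) :=
        le_trans (Nat.fib_le_fib_succ) (by omega)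
      have hc : (Nat.fib m : Int) * (2 * (Nat.fib (m + 1) : Int) - (Nat.fib m : Int))
          = (Nat.fib (2 * m) : Int) := by
        rw [Nat.fib_two_mul, Nat.cast_mul, Nat.cast_sub hle]
        push_cast
        ring
      have hd : (Nat.fib m : Int) * (Nat.fib m : Int) + (Nat.fib (m + 1) : Int) * (Nat.fib (m + 1) : Int)
          = (Nat.fib (2 * m + 1) : Int) := by
        rw [Nat.fib_two_mul_add_one]
        push_cast
        ring
      by_cases hp : k % 2 = 1
      · have hk : k = 2 * m + 1 := by omega
        simp only [hp, if_pos]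
        rw [hk]
        refine Prod.ext ?_ ?_
        · simpa using hd
        · show (Nat.fib m : Int) * (2 * (Nat.fib (m+1) : Int) - _) + _ = _
          rw [hd, hc]
          have : 2 * m + 1 + 1 = 2 * m + 2 := by omega
          rw [this, Nat.fib_add_two]
          push_cast
          ring
      · have hk : k = 2 * m := by omega
        rw [if_neg hp, hk]
        refine Prod.ext ?_ ?_
        · simpa using hc
        · simpa using hd

-- running the backward subtraction loop k times from (F(j), F(j+1)) appends F(j-1) … F(j-k)
theorem fibDown_spec : ∀ (k j : Nat) (out : List Int), k ≤ j →
    fibDown k ((Nat.fib j : Int)) ((Nat.fib (j + 1) : Int)) out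
      = out ++ (List.range k).map (fun i => (Nat.fib (j - 1 - i) : Int)) := by
  intro k
  induction k with
  | zero => intro j out _; simp [fibDown]
  | succ k ih =>
    intro j out hk
    obtain ⟨j', rfl⟩ : ∃ j', j = j' + 1 := ⟨j - 1, by omega⟩
    have hsub : (Nat.fib (j' + 1 + 1) : Int) - (Nat.fib (j' + 1) : Int) = (Nat.fib j' : Int) := by
      rw [Nat.fib_add_two]
      push_cast
      ring
    show fibDown k _ _ _ = _
    rw [hsub, ih j' (out ++ [(Nat.fib j' : Int)]) (by omega)]
    have hfs : (List.range (k + 1)).map (fun i => (Nat.fib (j' + 1 - 1 - i) : Int))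
        = (Nat.fib j' : Int) :: (List.range k).map (fun i => (Nat.fib (j' - 1 - i) : Int)) := by
      rw [List.range_succ_eq_map, List.map_cons, List.map_map]
      refine congrArg₂ _ ?_ ?_
      · exact congrArg (fun t => ((Nat.fib t : Int))) (by omega)
      · refine List.map_congr_left fun i _ => ?_
        simp only [Function.comp]
        exact congrArg (fun t => ((Nat.fib t : Int))) (by omega)
    rw [hfs, List.append_assoc, List.singleton_append]

-- reversing [F(t-1), …, F(0)] gives the canonical list
theorem reverse_map_range_fib (t : Nat) :
    ((List.range t).map (fun i => (Nat.fib (t - 1 - i) : Int))).reverse = fibList t := by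
  apply List.ext_getElem
  · simp [fibList]
  · intro i h1 h2
    have ht : i < t := by simpa [fibList] using h2
    simp only [List.getElem_reverse, List.length_map, List.length_range,
      List.getElem_map, List.getElem_range, fibList]
    exact congrArg (fun k => ((Nat.fib k : Int))) (by omega)

-- A's while loop, started on the canonical list of length m ≥ 2, extends it to length max m n
theorem fibLoopA_fibList (n : Int) : ∀ (K m : Nat), 2 ≤ m → (n - (m : Int)).toNat = K →
    fibLoopA n (fibList m) = fibList (max m n.toNat) := by
  intro K
  induction K with
  | zero =>
    intro m hm hK
    have hlen : (fibList m).length = m := by simp [fibList]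
    rw [fibLoopA, dif_neg (by rw [hlen]; omega)]
    congr 1
    omega
  | succ K ih =>
    intro m hm hK
    have hlen : (fibList m).length = m := by simp [fibList]
    rw [fibLoopA, dif_pos (by rw [hlen]; omega)]
    have h1 : PySem.List.pyGet? (fibList m) (-1) = some (Nat.fib (m - 1) : Int) := by
      obtain ⟨m', rfl⟩ : ∃ m', m = m' + 1 := ⟨m - 1, by omega⟩
      rw [fibList_succ, PySem.List.pyGet?_neg_one_append_singleton]
      simp
    have h2 : PySem.List.pyGet? (fibList m) (-2) = some (Nat.fib (m - 2) : Int) := by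
      rw [PySem.List.pyGet?_neg_ofNat (fibList m) 2 (by omega) (by rw [hlen]; omega)]
      rw [hlen]
      simp only [fibList, List.getElem?_map]
      rw [List.getElem?_range (by omega : m - 2 < m)]
      rfl
    rw [h1, h2]
    simp only [Option.getD_some]
    have hfib : (Nat.fib (m - 1) : Int) + (Nat.fib (m - 2) : Int) = (Nat.fib m : Int) := by
      obtain ⟨m', rfl⟩ : ∃ m', m = m' + 2 := ⟨m - 2, by omega⟩
      simp only [Nat.add_sub_cancel, show m' + 2 - 1 = m' + 1 from by omega]
      rw [Nat.fib_add_two]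
      push_cast
      ring
    rw [hfib, ← fibList_succ, ih (m + 1) (by omega) (by omega)]
    congr 1
    omega

-- ===== VERDICT (by name: the statement is the Claim_ definition above) =====
theorem factorial_febo_spec : Claim_equal_factorial_febo := by
  intro n _ hn
  have hn' : 0 ≤ n := hn
  unfold Spec_factorial_febo factorial_febo factorial_febo_alt
  simp only
  refine Prod.ext ?_ ?_
  · -- factorial: balanced product = left fold over the range
    show _ = prodRange 2 n
    rw [prodRange_eq_prod (n - 2).toNat 2 n (by omega), List.prod_eq_foldl]
  · -- fibonacci: both sides equal fibList n.toNat
    show fibLoopA n _ = _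
    rw [fibPair_eq n.toNat]
    rw [fibDown_spec n.toNat n.toNat [] (le_refl _)]
    simp only [List.nil_append]
    rw [reverse_map_range_fib]
    rcases lt_trichotomy n 1 with h1 | h1 | h1
    · have hn0 : n = 0 := by omega
      subst hn0
      rw [fibLoopA]
      simp [fibList]
    · subst h1
      rw [if_pos (show (1:Int) ≥ 1 from by omega), if_neg (show ¬ ((1:Int) ≥ 2) from by omega),
        fibLoopA]
      norm_num
      decide
    · have hg2 : n ≥ 2 := by omega
      rw [if_pos (show n ≥ 1 from by omega), if_pos hg2]
      have hstart : ([0] : List Int) ++ [1] = fibList 2 := by decide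
      rw [hstart, fibLoopA_fibList n (n - 2).toNat 2 (by omega) (by omega)]
      congr 1
      omega
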